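-- pv_equiv track=rewrite | github.com/pypi-data/pypi-mirror-344 | packages/abstract-ocr/abstract_ocr-0.0.0.210-py3-none-any.whl/abstract_ocr/video_utils.py | get_title_description
-- ===== SOURCE A (Python) =====
-- def get_title_description(string,leng = 65):
--     # If the string is 40 characters or less, return it as title with empty description
--     if len(string) <= leng:
--         return string, ""
--
--     # Define separators to try splitting on
--     separators = ['.', '!', ':', '|', ' ']
--
--     # Try each separator
--     for sep in separators:
--         parts = string.split(sep)
--         if len(parts) > 1:  # If the separator exists and splits the string
--             title = ""
--             for i, part in enumerate(parts):
--                 # Build the title incrementally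
--                 potential_title = sep.join(parts[:i + 1]) if i > 0 else part
--                 if len(potential_title) <= leng:
--                     title = potential_title
--                 else:
--                     # If adding the next part exceeds 40, use the last valid title
--                     if title:  # Ensure we have a title
--                         description = sep.join(parts[i:]).strip()
--                         # Include the separator in the title if it fits
--                         if len(title + sep) <= leng:
--                             title += sep
--                         return title, description
--                     else:
--                         # No separator found within 40 yet, continue to next separator
--                         break
--
--     # If no separators are found within 40 characters, return full string as title
--     # and empty description (since we don't want to cut mid-word)
--     return string, ""
-- ===== SOURCE B (Python) =====
-- def get_title_description(string, leng=65):
--     if len(string) <= leng: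
--         return string, ""
--     for sep in ['.', '!', ':', '|', ' ']:
--         p = string.rfind(sep, 0, max(leng + 1, 0))
--         if p > 0:
--             title = string[:p]
--             if p + 1 <= leng:
--                 title += sep
--             return title, string[p + 1:].strip()
--     return string, ""
-- ===== Notes on version B (the rewrite author's own statement) =====
-- stated objective: simpler
-- what changed: Replaces the split-into-parts plus incremental join-and-rebuild inner loop with a single rfind per separator: the rightmost separator position that fits in leng directly yields title = string[:p] and description = string[p+1:].strip().
import Mathlib
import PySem

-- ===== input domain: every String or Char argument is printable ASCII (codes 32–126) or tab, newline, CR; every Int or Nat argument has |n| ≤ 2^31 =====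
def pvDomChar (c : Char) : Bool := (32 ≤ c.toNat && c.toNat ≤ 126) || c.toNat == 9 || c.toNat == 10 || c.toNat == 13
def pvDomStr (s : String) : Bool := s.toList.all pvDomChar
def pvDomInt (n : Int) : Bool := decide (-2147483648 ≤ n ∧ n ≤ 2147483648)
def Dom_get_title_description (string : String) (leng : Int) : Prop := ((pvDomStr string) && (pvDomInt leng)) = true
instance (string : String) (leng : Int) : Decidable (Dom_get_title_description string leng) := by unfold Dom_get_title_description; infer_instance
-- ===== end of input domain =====

-- B replaces A's split/join incremental title rebuilding by a single rfind per separator (simpler, one pass per separator); same return value on every input.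


-- ===== PORT A =====
-- Faithful transliteration of A: split on each separator, rebuild the title incrementally.
def gtdPartsLoop (sep : List Char) (parts : List (List Char)) (leng : Int) :
    Nat → List Char → List (List Char) → Option (List Char × List Char)
  | _, _, [] => none
  | i, title, part :: rest =>
    let potential := if 0 < i then PySem.Chars.join sep (parts.take (i+1)) else part
    if (PySem.Chars.len potential : Int) ≤ leng then
      gtdPartsLoop sep parts leng (i+1) potential rest
    else if title ≠ [] then
      some ((if (PySem.Chars.len (title ++ sep) : Int) ≤ leng then title ++ sep else title),
            PySem.Chars.strip (PySem.Chars.join sep (parts.drop i)))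
    else none

def gtdSepLoop (s : List Char) (leng : Int) : List (List Char) → List Char × List Char
  | [] => (s, [])
  | sep :: seps =>
    let parts := PySem.Chars.splitOn s sep
    if 1 < parts.length then
      match gtdPartsLoop sep parts leng 0 [] parts with
      | some r => r
      | none => gtdSepLoop s leng seps
    else gtdSepLoop s leng seps

def get_title_description (string : String) (leng : Int) : String × String :=
  let s := string.toList
  if (PySem.Chars.len s : Int) ≤ leng then (string, "") else
  let r := gtdSepLoop s leng [['.'], ['!'], [':'], ['|'], [' ']]
  (String.ofList r.1, String.ofList r.2)

-- ===== PORT B =====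
-- Transliteration of B: one rfind per separator (rightmost occurrence that fits in leng).
def gtdAltLoop (s : List Char) (leng : Int) : List (List Char) → List Char × List Char
  | [] => (s, [])
  | sep :: seps =>
    let p := PySem.Chars.rfindFrom s sep 0 (some (max (leng + 1) 0))
    if 0 < p then
      let title := PySem.List.slice s none (some p)
      let title := if p + 1 ≤ leng then title ++ sep else title
      (title, PySem.Chars.strip (PySem.List.slice s (some (p + 1)) none))
    else gtdAltLoop s leng seps

def get_title_description_alt (string : String) (leng : Int) : String × String :=
  let s := string.toList
  if (PySem.Chars.len s : Int) ≤ leng then (string, "") else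
  let r := gtdAltLoop s leng [['.'], ['!'], [':'], ['|'], [' ']]
  (String.ofList r.1, String.ofList r.2)

-- ===== PRECONDITION & SPEC =====
def Spec_get_title_description (string : String) (leng : Int) (out : String × String) : Prop := out = get_title_description_alt string leng
instance (string : String) (leng : Int) (out : String × String) : Decidable (Spec_get_title_description string leng out) := by unfold Spec_get_title_description; infer_instance

-- ===== CLAIM (what is proved, stated in full; the proofs are below) =====
def Claim_equal_get_title_description : Prop := ∀ (string : String) (leng : Int), Dom_get_title_description string leng → Spec_get_title_description string leng (get_title_description string leng)

-- ===== LEMMAS AND PROOFS =====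

-- abbreviations used only by the proofs
def gtdJ (c : Char) (xs : List (List Char)) : List Char := [c].intercalate xs
def gtdQ (c : Char) (parts : List (List Char)) (j : Nat) : Nat := (gtdJ c (parts.take j)).length

-- [c] is a prefix of w.drop i iff w[i]? = some c
theorem gtd_prefix_char (c : Char) (w : List Char) (i : Nat) :
    ([c].isPrefixOf (w.drop i)) = true ↔ w[i]? = some c := by
  rw [List.isPrefixOf_iff_prefix]
  constructor
  · rintro ⟨t, ht⟩
    have := congrArg List.head? ht
    simpa [List.head?_drop] using this.symm
  · intro h
    have h' : (w.drop i).head? = some c := by simpa [List.head?_drop] using h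
    cases hd : w.drop i with
    | nil => simp [hd] at h'
    | cons a t => rw [hd] at h'; simp at h'; exact ⟨t, by simp [h']⟩

theorem gtd_rfind_go_none (c : Char) (w : List Char) (h : ∀ i : Nat, w[i]? ≠ some c) :
    ∀ j, PySem.Chars.rfind.go w [c] j = -1 := by
  intro j
  induction j with
  | zero =>
    have hp : ([c].isPrefixOf w) ≠ true := by
      intro hh
      exact h 0 ((gtd_prefix_char c w 0).mp (by simpa using hh))
    simp only [PySem.Chars.rfind.go]
    rw [if_neg hp]
  | succ j ih =>
    have hp : ([c].isPrefixOf (w.drop (j+1))) ≠ true := by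
      intro hh; exact h (j+1) ((gtd_prefix_char c w (j+1)).mp hh)
    simp only [PySem.Chars.rfind.go]
    rw [if_neg hp]; exact ih

theorem gtd_rfind_go_at (c : Char) (w : List Char) (q : Nat) (hq : w[q]? = some c)
    (habove : ∀ i : Nat, q < i → w[i]? ≠ some c) :
    ∀ j, q ≤ j → PySem.Chars.rfind.go w [c] j = q := by
  intro j
  induction j with
  | zero =>
    intro hj
    have hq0 : q = 0 := Nat.le_zero.mp hj
    subst hq0
    have hp : ([c].isPrefixOf w) = true := by
      have := (gtd_prefix_char c w 0).mpr hq; simpa using this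
    simp only [PySem.Chars.rfind.go]
    rw [if_pos hp]; rfl
  | succ j ih =>
    intro hj
    by_cases hqe : q = j + 1
    · subst hqe
      have hp : ([c].isPrefixOf (w.drop (j+1))) = true := (gtd_prefix_char c w (j+1)).mpr hq
      simp only [PySem.Chars.rfind.go]
      rw [if_pos hp]
    · have hlt : q ≤ j := by omega
      have hp : ([c].isPrefixOf (w.drop (j+1))) ≠ true := by
        intro hh; exact habove (j+1) (by omega) ((gtd_prefix_char c w (j+1)).mp hh)
      simp only [PySem.Chars.rfind.go]
      rw [if_neg hp]; exact ih hlt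

theorem gtd_rfind_none (c : Char) (w : List Char) (h : ∀ i : Nat, w[i]? ≠ some c) :
    PySem.Chars.rfind w [c] = -1 := gtd_rfind_go_none c w h _

theorem gtd_rfind_at (c : Char) (w : List Char) (q : Nat) (hq : w[q]? = some c)
    (habove : ∀ i : Nat, q < i → w[i]? ≠ some c) :
    PySem.Chars.rfind w [c] = q := by
  have hql : q < w.length := by
    by_contra hh
    simp [List.getElem?_eq_none (by omega : w.length ≤ q)] at hq
  exact gtd_rfind_go_at c w q hq habove _ (by omega)

-- rfindFrom with start 0 and a nonnegative end bound is rfind on a take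
theorem gtd_rfindFrom_eval (c : Char) (s : List Char) (M : Int) (hM : 0 ≤ M) :
    PySem.Chars.rfindFrom s [c] 0 (some M) =
      PySem.Chars.rfind (s.take (min s.length M.toNat)) [c] := by
  unfold PySem.Chars.rfindFrom
  norm_num
  by_cases h1 : (s.length : Int) < M
  · rw [if_pos h1]
    have he : min s.length M.toNat = s.length := by omega
    rw [he]
    simp only [Int.toNat_natCast, List.take_length]
    by_cases hr : PySem.Chars.rfind s [c] = -1
    · rw [if_pos hr, hr]; simp
    · rw [if_neg hr, if_neg (by omega : ¬ (s.length : Int) < 0)]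
  · rw [if_neg h1]
    rw [if_neg (by omega : ¬ M < 0)]
    have he : min s.length M.toNat = M.toNat := by omega
    rw [he]
    by_cases hr : PySem.Chars.rfind (s.take M.toNat) [c] = -1
    · rw [if_pos hr, hr]; simp
    · rw [if_neg hr, if_neg (by omega : ¬ M < (0:Int))]

-- splitOn bridge to Mathlib's splitOnP
theorem gtd_splitOn_go (c : Char) :
    ∀ (fuel : Nat) (l cur acc : _), l.length ≤ fuel →
      PySem.Chars.splitOn.go [c] fuel l cur acc
        = acc.reverse ++ (List.splitOnP (· == c) l).modifyHead (cur.reverse ++ ·) := by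
  intro fuel
  induction fuel with
  | zero =>
    intro l cur acc hl
    have : l = [] := List.length_eq_zero_iff.mp (by omega)
    subst this
    simp [PySem.Chars.splitOn.go, List.splitOnP_nil]
  | succ fuel ih =>
    intro l cur acc hl
    cases l with
    | nil => simp [PySem.Chars.splitOn.go, List.splitOnP_nil]
    | cons a rest =>
      by_cases hc : a = c
      · subst hc
        have hpre : [a].isPrefixOf (a :: rest) = true := by
          rw [List.isPrefixOf_iff_prefix]; exact ⟨rest, rfl⟩
        simp only [PySem.Chars.splitOn.go, hpre, if_pos, List.length_cons, List.length_nil,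
          List.drop_succ_cons, List.drop_zero]
        rw [ih rest [] (cur.reverse :: acc) (by simpa using Nat.lt_succ_iff.mp (by simpa using hl))]
        rw [List.splitOnP_cons]
        simp only [beq_self_eq_true, if_true, List.modifyHead_cons, List.reverse_cons,
          List.append_nil, List.nil_append, List.append_assoc, List.cons_append]
        have hid : (fun x : List Char => [].reverse ++ x) = @id (List Char) := by funext x; simp
        rw [hid, List.modifyHead_id]
        rfl
      · have hpre : [c].isPrefixOf (a :: rest) = false := by
          rw [Bool.eq_false_iff]
          intro hh
          rcases List.isPrefixOf_iff_prefix.mp hh with ⟨t, ht⟩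
          simp at ht
          exact hc ht.1.symm
        simp only [PySem.Chars.splitOn.go, hpre, Bool.false_eq_true, if_false]
        rw [ih rest (a :: cur) acc (by simpa using hl)]
        rw [List.splitOnP_cons]
        rw [if_neg (by simpa using hc)]
        rw [List.modifyHead_modifyHead]
        cases hsp : List.splitOnP (fun x => x == c) rest with
        | nil => simp
        | cons h t => simp
theorem gtd_splitOn_single (c : Char) (s : List Char) :
    PySem.Chars.splitOn s [c] = List.splitOnP (· == c) s := by
  unfold PySem.Chars.splitOn
  rw [gtd_splitOn_go c (s.length + 1) s [] [] (by omega)]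
  have hid : (fun x : List Char => List.reverse [] ++ x) = @id (List Char) := by funext x; simp
  rw [List.reverse_nil, List.nil_append, hid, List.modifyHead_id]
  rfl
-- pieces of splitOnP contain no separator
theorem gtd_noc (c : Char) : ∀ (s : List Char) piece, piece ∈ List.splitOnP (· == c) s → c ∉ piece := by
  intro s
  induction s with
  | nil => intro piece h; simp [List.splitOnP_nil] at h; simp [h]
  | cons a t ih =>
    intro piece h
    rw [List.splitOnP_cons] at h
    by_cases hc : a = c
    · subst hc
      rw [if_pos (by simp)] at h
      rcases List.mem_cons.mp h with h1 | h1
      · simp [h1]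
      · exact ih piece h1
    · rw [if_neg (by simpa using hc)] at h
      cases hsp : List.splitOnP (fun x => x == c) t with
      | nil => exact absurd hsp (List.splitOnP_ne_nil _ _)
      | cons hd tl =>
        rw [hsp] at h
        simp only [List.modifyHead_cons] at h
        rcases List.mem_cons.mp h with h1 | h1
        · subst h1
          intro hmem
          rcases List.mem_cons.mp hmem with h2 | h2
          · exact hc h2.symm
          · exact ih hd (by rw [hsp]; exact List.mem_cons_self) h2
        · exact ih piece (by rw [hsp]; exact List.mem_cons_of_mem _ h1)
theorem gtd_one_lt_length_iff (c : Char) (s : List Char) :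
    1 < (List.splitOnP (· == c) s).length ↔ c ∈ s := by
  induction s with
  | nil => simp [List.splitOnP_nil]
  | cons a t ih =>
    rw [List.splitOnP_cons]
    by_cases hc : a = c
    · subst hc
      rw [if_pos (by simp)]
      have := List.splitOnP_ne_nil (fun x => x == a) t
      constructor
      · intro _; exact List.mem_cons_self
      · intro _
        have : 0 < (List.splitOnP (fun x => x == a) t).length := List.length_pos_iff.mpr this
        simp; omega
    · rw [if_neg (by simpa using hc)]
      rw [List.length_modifyHead]
      rw [ih]
      simp only [List.mem_cons]
      constructor
      · intro hh; exact Or.inr hh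
      · intro hh
        rcases hh with h1 | h1
        · exact absurd h1.symm hc
        · exact h1
-- intercalate facts
theorem gtd_J_nil (c : Char) : gtdJ c [] = [] := by simp [gtdJ, List.intercalate]

theorem gtd_J_cons (c : Char) (x : List Char) (l : List (List Char)) (h : l ≠ []) :
    gtdJ c (x :: l) = x ++ c :: gtdJ c l := by
  cases l with
  | nil => exact absurd rfl h
  | cons y t => simp [gtdJ, List.intercalate]

theorem gtd_J_singleton (c : Char) (x : List Char) : gtdJ c [x] = x := by
  simp [gtdJ, List.intercalate]

theorem gtd_J_concat (c : Char) : ∀ (xs : List (List Char)) (y : List Char), xs ≠ [] →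
    gtdJ c (xs ++ [y]) = gtdJ c xs ++ c :: y := by
  intro xs
  induction xs with
  | nil => intro y h; exact absurd rfl h
  | cons x t ih =>
    intro y _
    cases t with
    | nil => simp [gtd_J_singleton, gtd_J_cons c x [y] (by simp)]
    | cons z u =>
      rw [List.cons_append, gtd_J_cons c x ((z :: u) ++ [y]) (by simp),
          gtd_J_cons c x (z :: u) (by simp), ih y (by simp)]
      simp

theorem gtd_J_take_one' (c : Char) (parts : List (List Char)) (h : 0 < parts.length) :
    gtdJ c (parts.take 1) = parts[0] := by
  cases parts with
  | nil => simp at h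
  | cons x t => simp [gtd_J_singleton]

theorem gtd_J_take_one (c : Char) (parts : List (List Char)) (h : parts ≠ []) :
    gtdJ c (parts.take 1) = parts.headI := by
  cases parts with
  | nil => exact absurd rfl h
  | cons x t => simp [gtd_J_singleton]

theorem gtd_J_take_succ (c : Char) (parts : List (List Char)) (j : Nat)
    (h0 : 0 < j) (h : j < parts.length) :
    gtdJ c (parts.take (j+1)) = gtdJ c (parts.take j) ++ c :: parts[j] := by
  rw [List.take_add_one, List.getElem?_eq_getElem h]
  exact gtd_J_concat c _ _ (by
    have : (parts.take j).length = j := by simp; omega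
    intro hnil; rw [hnil] at this; simp at this; omega)

theorem gtd_decomp (c : Char) (parts : List (List Char)) :
    ∀ k, 0 < k → k < parts.length →
    gtdJ c parts = gtdJ c (parts.take k) ++ c :: gtdJ c (parts.drop k) := by
  intro k
  induction k with
  | zero => intro h; omega
  | succ k ih =>
    intro _ hk
    by_cases hk0 : k = 0
    · subst hk0
      cases parts with
      | nil => simp at hk
      | cons x t =>
        cases t with
        | nil => simp at hk
        | cons y u =>
          rw [gtd_J_cons c x (y :: u) (by simp)]
          simp [gtd_J_singleton]
    · have hk' : k < parts.length := by omega
      rw [ih (by omega) hk']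
      have hdk : parts.drop k = parts[k] :: parts.drop (k+1) := List.drop_eq_getElem_cons hk'
      rw [hdk, gtd_J_cons c parts[k] (parts.drop (k+1)) (by
            intro hnil
            have := congrArg List.length hnil
            simp at this
            omega),
          gtd_J_take_succ c parts k (by omega) hk']
      simp

-- Q facts
theorem gtd_Q_zero (c : Char) (parts : List (List Char)) : gtdQ c parts 0 = 0 := by
  simp [gtdQ, gtd_J_nil]

theorem gtd_Q_one (c : Char) (parts : List (List Char)) (h : parts ≠ []) :
    gtdQ c parts 1 = parts.headI.length := by
  simp [gtdQ, gtd_J_take_one c parts h]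

theorem gtd_Q_step (c : Char) (parts : List (List Char)) (j : Nat)
    (h0 : 0 < j) (h : j < parts.length) :
    gtdQ c parts (j+1) = gtdQ c parts j + 1 + parts[j].length := by
  simp [gtdQ, gtd_J_take_succ c parts j h0 h]; omega

theorem gtd_Q_mono (c : Char) (parts : List (List Char)) :
    ∀ a b, a ≤ b → gtdQ c parts a ≤ gtdQ c parts b := by
  have hstep : ∀ b, gtdQ c parts b ≤ gtdQ c parts (b+1) := by
    intro b
    by_cases hb : b < parts.length
    · by_cases hb0 : b = 0
      · subst hb0
        rw [gtd_Q_zero]; omega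
      · rw [gtd_Q_step c parts b (by omega) hb]; omega
    · have : parts.take (b+1) = parts.take b := by
        rw [List.take_of_length_le (by omega), List.take_of_length_le (by omega)]
      unfold gtdQ
      rw [this]
  intro a b hab
  induction b with
  | zero => have : a = 0 := by omega
            subst this; omega
  | succ b ih =>
    by_cases hb : a = b + 1
    · subst hb; omega
    · exact le_trans (ih (by omega)) (hstep b)

theorem gtd_Q_cons (c : Char) (x : List Char) (l : List (List Char)) (j : Nat)
    (hj : 0 < j) (hl : l ≠ []) :
    gtdQ c (x :: l) (j+1) = x.length + 1 + gtdQ c l j := by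
  unfold gtdQ
  rw [List.take_cons (by omega : 0 < j + 1)]
  simp only [Nat.add_sub_cancel]
  rw [gtd_J_cons c x (l.take j) (by
    cases l with
    | nil => exact absurd rfl hl
    | cons y t =>
      cases j with
      | zero => omega
      | succ j => simp)]
  simp; omega

-- occurrences of c in the intercalation are exactly the gtdQ positions
theorem gtd_occ (c : Char) : ∀ (parts : List (List Char)), parts ≠ [] →
    (∀ piece ∈ parts, c ∉ piece) → ∀ q : Nat,
    ((gtdJ c parts)[q]? = some c ↔ ∃ j, 0 < j ∧ j < parts.length ∧ q = gtdQ c parts j) := by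
  intro parts
  induction parts with
  | nil => intro h; exact absurd rfl h
  | cons x l ih =>
    intro _ hno q
    cases l with
    | nil =>
      rw [gtd_J_singleton]
      constructor
      · intro h
        exact absurd (List.mem_of_getElem? h) (hno x List.mem_cons_self)
      · rintro ⟨j, hj0, hj1, _⟩
        simp at hj1; omega
    | cons y t =>
      rw [gtd_J_cons c x (y :: t) (by simp)]
      rcases Nat.lt_trichotomy q x.length with hq | hq | hq
      · rw [List.getElem?_append_left (by omega)]
        constructor
        · intro h
          exact absurd (List.mem_of_getElem? h) (hno x List.mem_cons_self)
        · rintro ⟨j, hj0, hj1, hj2⟩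
          cases j with
          | zero => omega
          | succ j =>
            cases j with
            | zero =>
              rw [gtd_Q_one c (x :: y :: t) (by simp)] at hj2
              simp at hj2; omega
            | succ j =>
              rw [gtd_Q_cons c x (y :: t) (j+1) (by omega) (by simp)] at hj2
              omega
      · subst hq
        rw [List.getElem?_append_right (by omega)]
        simp only [Nat.sub_self, List.getElem?_cons_zero]
        constructor
        · intro _
          exact ⟨1, by omega, by simp, by rw [gtd_Q_one c (x :: y :: t) (by simp)]; simp⟩
        · intro _; trivial
      · rw [List.getElem?_append_right (by omega)]
        have hq1 : q - x.length = (q - x.length - 1) + 1 := by omega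
        rw [hq1, List.getElem?_cons_succ]
        rw [ih (by simp) (fun piece hp => hno piece (List.mem_cons_of_mem x hp)) (q - x.length - 1)]
        constructor
        · rintro ⟨j, hj0, hj1, hj2⟩
          refine ⟨j + 1, by omega, by simp at hj1 ⊢; omega, ?_⟩
          rw [gtd_Q_cons c x (y :: t) j hj0 (by simp)]
          omega
        · rintro ⟨j, hj0, hj1, hj2⟩
          cases j with
          | zero => omega
          | succ j =>
            cases j with
            | zero =>
              rw [gtd_Q_one c (x :: y :: t) (by simp)] at hj2
              simp at hj2; omega
            | succ j =>
              rw [gtd_Q_cons c x (y :: t) (j+1) (by omega) (by simp)] at hj2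
              refine ⟨j + 1, by omega, by simp at hj1 ⊢; omega, by omega⟩

-- the inner loop of A
theorem gtd_loop (c : Char) (parts : List (List Char)) (leng : Int)
    (hQn : leng < (gtdQ c parts parts.length : Int))
    (istar : Nat)
    (h1 : leng < (gtdQ c parts (istar+1) : Int))
    (h2 : ∀ j, j < istar → (gtdQ c parts (j+1) : Int) ≤ leng) :
    ∀ d i title, parts.length - i = d → i < parts.length →
      (∀ j, 0 < j → j ≤ i → (gtdQ c parts j : Int) ≤ leng) →
      title = gtdJ c (parts.take i) →
      gtdPartsLoop [c] parts leng i title (parts.drop i)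
        = (if gtdJ c (parts.take istar) = [] then none else
            some ((if (gtdQ c parts istar : Int) + 1 ≤ leng
                    then gtdJ c (parts.take istar) ++ [c] else gtdJ c (parts.take istar)),
                  PySem.Chars.strip (gtdJ c (parts.drop istar)))) := by
  intro d
  induction d with
  | zero => intro i title hd hi; omega
  | succ d ihd =>
    intro i title hd hi hfit htitle
    rw [List.drop_eq_getElem_cons hi]
    simp only [gtdPartsLoop]
    have hpot : (if 0 < i then PySem.Chars.join [c] (parts.take (i+1)) else parts[i])
        = gtdJ c (parts.take (i+1)) := by
      by_cases hi0 : 0 < i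
      · rw [if_pos hi0]; rfl
      · have : i = 0 := by omega
        subst this
        rw [if_neg (by omega)]
        exact (gtd_J_take_one' c parts (by omega)).symm
    rw [hpot]
    have hlenpot : (PySem.Chars.len (gtdJ c (parts.take (i+1))) : Int) = (gtdQ c parts (i+1) : Int) := by
      rw [PySem.Chars.len_eq]; rfl
    rw [hlenpot]
    by_cases hfit1 : (gtdQ c parts (i+1) : Int) ≤ leng
    · rw [if_pos hfit1]
      have hne : i + 1 ≠ parts.length := by
        intro he
        rw [he] at hfit1
        omega
      exact ihd (i+1) (gtdJ c (parts.take (i+1))) (by omega) (by omega)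
        (fun j hj0 hj1 => by
          by_cases hje : j = i + 1
          · subst hje; exact hfit1
          · exact hfit j hj0 (by omega))
        rfl
    · rw [if_neg hfit1]
      have histar : istar = i := by
        rcases Nat.lt_trichotomy istar i with hh | hh | hh
        · exfalso
          have := hfit (istar+1) (by omega) (by omega)
          omega
        · exact hh
        · exfalso
          have := h2 i hh
          omega
      subst histar
      rw [← htitle]
      by_cases ht : title = []
      · rw [if_pos ht]
        rw [if_neg (by simp [ht])]
      · rw [if_neg ht, if_pos ht]
        have hlt : (PySem.Chars.len (title ++ [c]) : Int) = (gtdQ c parts istar : Int) + 1 := by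
          rw [PySem.Chars.len_eq]
          rw [htitle]
          simp [gtdQ]
        rw [hlt]
        rfl


-- one separator: A's step equals B's step
theorem gtd_core (c : Char) (s : List Char) (leng : Int) (hlen : leng < (s.length : Int)) :
    (if 1 < (PySem.Chars.splitOn s [c]).length
      then gtdPartsLoop [c] (PySem.Chars.splitOn s [c]) leng 0 [] (PySem.Chars.splitOn s [c])
      else none)
    = (let p := PySem.Chars.rfindFrom s [c] 0 (some (max (leng + 1) 0));
       if 0 < p then
        some ((if p + 1 ≤ leng then PySem.List.slice s none (some p) ++ [c]
                else PySem.List.slice s none (some p)),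
              PySem.Chars.strip (PySem.List.slice s (some (p + 1)) none))
       else none) := by
  rw [gtd_splitOn_single]
  have hJ : gtdJ c (List.splitOnP (· == c) s) = s := List.intercalate_splitOn s c
  set parts := List.splitOnP (· == c) s with hparts
  have hne : parts ≠ [] := List.splitOnP_ne_nil _ _
  have hnoc : ∀ piece ∈ parts, c ∉ piece := fun p hp => gtd_noc c s p hp
  have hQlen : gtdQ c parts parts.length = s.length := by
    unfold gtdQ
    rw [List.take_length, hJ]
  simp only [gtd_rfindFrom_eval c s (max (leng + 1) 0) (le_max_right _ _)]
  set m := min s.length (max (leng + 1) 0).toNat with hm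
  have hwin : ∀ i : Nat, i < m → (i : Int) ≤ leng := by
    intro i hi
    have h1 : i < (max (leng + 1) 0).toNat := by omega
    omega
  have hocc := fun q => gtd_occ c parts hne hnoc q
  rw [hJ] at hocc
  by_cases hcs : c ∈ s
  · have hlen1 : 1 < parts.length := (gtd_one_lt_length_iff c s).mpr hcs
    rw [if_pos hlen1]
    have hQn : leng < (gtdQ c parts parts.length : Int) := by rw [hQlen]; exact hlen
    have hex : ∃ j, leng < (gtdQ c parts (j+1) : Int) := by
      refine ⟨parts.length - 1, ?_⟩
      have he : parts.length - 1 + 1 = parts.length := by omega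
      rw [he]; exact hQn
    have h1 := Nat.find_spec hex
    have h2 : ∀ j, j < Nat.find hex → (gtdQ c parts (j+1) : Int) ≤ leng :=
      fun j hj => not_lt.mp (Nat.find_min hex hj)
    set istar := Nat.find hex with histar
    have histar_lt : istar < parts.length := by
      have hwit : leng < (gtdQ c parts (parts.length - 1 + 1) : Int) := by
        have he : parts.length - 1 + 1 = parts.length := by omega
        rw [he]; exact hQn
      have : Nat.find hex ≤ parts.length - 1 := Nat.find_le hwit
      omega
    have hloop := gtd_loop c parts leng hQn istar h1 h2 parts.length 0 []
      (by omega) (by omega) (fun j hj0 hj1 => by omega) (by simp [gtd_J_nil])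
    rw [List.drop_zero] at hloop
    rw [hloop]
    by_cases htnil : gtdJ c (parts.take istar) = []
    · rw [if_pos htnil]
      by_cases hi0 : istar = 0
      · -- no occurrence fits: rfind on the window is -1
        have hnone : ∀ i : Nat, (s.take m)[i]? ≠ some c := by
          intro i hi
          rw [List.getElem?_take] at hi
          by_cases him : i < m
          · rw [if_pos him] at hi
            rcases (hocc i).mp hi with ⟨j, hj0, hj1, hj2⟩
            have hmon : gtdQ c parts 1 ≤ gtdQ c parts j := gtd_Q_mono c parts 1 j (by omega)
            have : leng < (gtdQ c parts 1 : Int) := by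
              have := h1; rw [hi0] at this; simpa using this
            have := hwin i him
            omega
          · rw [if_neg him] at hi; exact absurd hi (by simp)
        rw [gtd_rfind_none c _ hnone]
        norm_num
      · -- istar = 1 with an empty first part: the only fitting occurrence is position 0
        have hq0 : gtdQ c parts istar = 0 := by unfold gtdQ; rw [htnil]; rfl
        have hi1 : istar = 1 := by
          by_contra hh
          have h2' : 2 ≤ istar := by omega
          have hmon : gtdQ c parts 2 ≤ gtdQ c parts istar := gtd_Q_mono c parts 2 istar h2'
          have hstep : gtdQ c parts 2 = gtdQ c parts 1 + 1 + parts[1].length :=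
            gtd_Q_step c parts 1 (by omega) hlen1
          omega
        have hlen0 : (0:Int) ≤ leng := by
          have := h2 0 (by omega)
          have hq1 : gtdQ c parts 1 = 0 := by rw [← hi1]; exact hq0
          rw [hq1] at this; simpa using this
        have hs0 : s[0]? = some c := by
          refine (hocc 0).mpr ⟨1, by omega, by omega, ?_⟩
          rw [← hi1, hq0]
        have hm0 : 0 < m := by
          have : 0 < s.length := by omega
          omega
        have hp0 : (s.take m)[0]? = some c := by
          rw [List.getElem?_take, if_pos hm0]; exact hs0
        have habove : ∀ i : Nat, 0 < i → (s.take m)[i]? ≠ some c := by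
          intro i hi0' hi
          rw [List.getElem?_take] at hi
          by_cases him : i < m
          · rw [if_pos him] at hi
            rcases (hocc i).mp hi with ⟨j, hj0, hj1, hj2⟩
            have hj2' : 2 ≤ j := by
              by_contra hh
              have : j = 1 := by omega
              subst this
              have hq1 : gtdQ c parts 1 = 0 := by rw [← hi1]; exact hq0
              omega
            have hmon : gtdQ c parts (istar+1) ≤ gtdQ c parts j :=
              gtd_Q_mono c parts (istar+1) j (by omega)
            have := hwin i him
            omega
          · rw [if_neg him] at hi; exact absurd hi (by simp)
        rw [gtd_rfind_at c _ 0 hp0 habove]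
        norm_num
    · rw [if_neg htnil]
      have hi0 : 0 < istar := by
        by_contra hh
        have : istar = 0 := by omega
        rw [this] at htnil
        exact htnil (by simp [gtd_J_nil])
      set q := gtdQ c parts istar with hq
      have hq1 : 0 < q := by
        have : (gtdJ c (parts.take istar)).length ≠ 0 := fun hh => htnil (List.length_eq_zero_iff.mp hh)
        unfold gtdQ at hq
        omega
      have hqle : (q : Int) ≤ leng := by
        have := h2 (istar - 1) (by omega)
        have he : istar - 1 + 1 = istar := by omega
        rw [he] at this
        exact this
      have hqlt : q < s.length := by
        have hstep : gtdQ c parts istar < gtdQ c parts (istar+1) := by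
          rw [gtd_Q_step c parts istar hi0 histar_lt]; omega
        have hmon : gtdQ c parts (istar+1) ≤ gtdQ c parts parts.length :=
          gtd_Q_mono c parts (istar+1) parts.length (by omega)
        omega
      have hqm : q < m := by omega
      have hpq : (s.take m)[q]? = some c := by
        rw [List.getElem?_take, if_pos hqm]
        exact (hocc q).mpr ⟨istar, hi0, histar_lt, rfl⟩
      have habove : ∀ i : Nat, q < i → (s.take m)[i]? ≠ some c := by
        intro i hqi hi
        rw [List.getElem?_take] at hi
        by_cases him : i < m
        · rw [if_pos him] at hi
          rcases (hocc i).mp hi with ⟨j, hj0, hj1, hj2⟩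
          have hji : istar < j := by
            by_contra hh
            have : gtdQ c parts j ≤ gtdQ c parts istar := gtd_Q_mono c parts j istar (by omega)
            omega
          have hmon : gtdQ c parts (istar+1) ≤ gtdQ c parts j :=
            gtd_Q_mono c parts (istar+1) j (by omega)
          have := hwin i him
          omega
        · rw [if_neg him] at hi; exact absurd hi (by simp)
      rw [gtd_rfind_at c _ q hpq habove]
      have hpos : (0:Int) < (q:Int) := by exact_mod_cast hq1
      rw [if_pos hpos]
      have hdec := gtd_decomp c parts istar hi0 histar_lt
      rw [hJ] at hdec
      have hlent : (gtdJ c (parts.take istar)).length = q := rfl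
      have hslice1 : PySem.List.slice s none (some (q : Int)) = gtdJ c (parts.take istar) := by
        rw [PySem.List.slice_to s (by omega)]
        rw [Int.toNat_natCast, hdec, ← hlent, List.take_left]
      have hslice2 : PySem.List.slice s (some ((q : Int) + 1)) none = gtdJ c (parts.drop istar) := by
        rw [PySem.List.slice_from s (by omega)]
        have he : ((q : Int) + 1).toNat = q + 1 := by omega
        rw [he, hdec]
        have he2 : gtdJ c (parts.take istar) ++ c :: gtdJ c (parts.drop istar)
            = (gtdJ c (parts.take istar) ++ [c]) ++ gtdJ c (parts.drop istar) := by simp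
        rw [he2]
        have he3 : q + 1 = (gtdJ c (parts.take istar) ++ [c]).length := by
          simp [hlent]
        rw [he3, List.drop_left]
      rw [hslice1, hslice2]
  · have hlen1 : ¬ 1 < parts.length := by
      rw [gtd_one_lt_length_iff c s]; exact hcs
    rw [if_neg hlen1]
    have hnone : ∀ i : Nat, (s.take m)[i]? ≠ some c := by
      intro i hi
      have : c ∈ s.take m := List.mem_of_getElem? hi
      exact hcs (List.mem_of_mem_take this)
    rw [gtd_rfind_none c _ hnone]
    norm_num


theorem gtd_outer (s : List Char) (leng : Int) (hlen : leng < (s.length : Int)) :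
    ∀ cs : List Char, gtdSepLoop s leng (cs.map ([·])) = gtdAltLoop s leng (cs.map ([·])) := by
  intro cs
  induction cs with
  | nil => rfl
  | cons c t ih =>
    have hc := gtd_core c s leng hlen
    simp only [List.map_cons, gtdSepLoop, gtdAltLoop]
    by_cases hp : 0 < PySem.Chars.rfindFrom s [c] 0 (some (max (leng + 1) 0))
    · simp only [if_pos hp] at hc ⊢
      by_cases hl : 1 < (PySem.Chars.splitOn s [c]).length
      · rw [if_pos hl] at hc; rw [if_pos hl, hc]
      · rw [if_neg hl] at hc; exact absurd hc.symm (by simp)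
    · simp only [if_neg hp] at hc ⊢
      by_cases hl : 1 < (PySem.Chars.splitOn s [c]).length
      · rw [if_pos hl] at hc; rw [if_pos hl, hc]; exact ih
      · rw [if_neg hl]; exact ih

-- ===== VERDICT (by name: the statement is the Claim_ definition above) =====
theorem get_title_description_spec : Claim_equal_get_title_description := by
  intro string leng _
  unfold Spec_get_title_description get_title_description get_title_description_alt
  by_cases h : (PySem.Chars.len string.toList : Int) ≤ leng
  · simp only [if_pos h]
  · simp only [if_neg h]
    have hlen : leng < (string.toList.length : Int) := by
      simp only [PySem.Chars.len_eq] at h; omega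
    have := gtd_outer string.toList leng hlen ['.', '!', ':', '|', ' ']
    simp only [List.map] at this
    rw [this]
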